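-- pv_equiv track=rewrite | github.com/Git-Lister/oer-phoenix | resources/harvesters/kbart_harvester.py | _get_first_flexible
-- ===== SOURCE A (Python) =====
-- from typing import Optional
--
-- def _get_first_flexible(row: dict, keys: list[str]) -> Optional[str]:
--     """Get first matching value with aggressive fuzzy matching."""
--     # Clean the row keys once
--     cleaned_row = {k.strip().lower(): v for k, v in row.items() if k}
--
--     # Try exact match on cleaned keys
--     for k in keys:
--         clean_k = k.strip().lower()
--         if clean_k in cleaned_row:
--             v = cleaned_row[clean_k]
--             if v and str(v).strip():
--                 return str(v).strip()
--
--     return None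
-- ===== SOURCE B (Python) =====
-- from typing import Optional
--
-- def _get_first_flexible(row: dict, keys: list[str]) -> Optional[str]:
--     """Get first matching value: one pass over the row filling a per-candidate
--     match table (last row entry wins), then a scan of the candidates in order."""
--     cleans = [k.strip().lower() for k in keys]
--     vals: list = [None] * len(keys)
--     hit = [False] * len(keys)
--     for k, v in row.items():
--         if not k:
--             continue
--         ck = k.strip().lower()
--         for i, c in enumerate(cleans):
--             if c == ck:
--                 vals[i] = v
--                 hit[i] = True
--     for i in range(len(keys)):
--         if hit[i] and vals[i] and str(vals[i]).strip():
--             return str(vals[i]).strip()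
--     return None
-- ===== Notes on version B (the rewrite author's own statement) =====
-- stated objective: alternative
-- what changed: Inverts the loop nesting: instead of building a normalized-key dict and looking candidates up, B makes one pass over the row filling a per-candidate match table (last matching row entry overwrites), then scans the candidates in order for the first non-empty stripped value.
import Mathlib
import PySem

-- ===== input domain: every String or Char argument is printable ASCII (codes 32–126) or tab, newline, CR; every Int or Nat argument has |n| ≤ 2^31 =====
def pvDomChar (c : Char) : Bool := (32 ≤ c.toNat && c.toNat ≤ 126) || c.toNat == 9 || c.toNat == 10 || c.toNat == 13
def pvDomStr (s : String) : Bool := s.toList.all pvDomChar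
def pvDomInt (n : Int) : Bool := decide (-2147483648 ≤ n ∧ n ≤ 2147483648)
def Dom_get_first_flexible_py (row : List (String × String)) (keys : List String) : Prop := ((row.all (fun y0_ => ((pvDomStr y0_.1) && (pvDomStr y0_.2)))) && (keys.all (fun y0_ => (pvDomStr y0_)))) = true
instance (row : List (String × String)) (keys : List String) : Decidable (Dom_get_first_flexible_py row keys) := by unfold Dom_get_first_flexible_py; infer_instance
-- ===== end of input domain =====

-- B inverts the loop nesting: one pass over the row fills a per-candidate match table,
-- then the candidates are scanned in order (objective: alternative decomposition, same result).

-- ===== PORT A =====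
-- k.strip().lower()
def pvCleanA (k : String) : String := PySem.Str.lower (PySem.Str.strip k)

-- for k in keys: … (over the precomputed cleaned_row dict)
def pvLoopA (cleaned : PySem.Dict String String) : List String → Option String
  | [] => none
  | k :: ks =>
    let clean_k := pvCleanA k
    match cleaned.get? clean_k with
    | some v =>
      if v ≠ "" ∧ PySem.Str.strip v ≠ "" then some (PySem.Str.strip v)
      else pvLoopA cleaned ks
    | none => pvLoopA cleaned ks

def get_first_flexible_py (row : List (String × String)) (keys : List String) : Option String :=
  -- cleaned_row = {k.strip().lower(): v for k, v in row.items() if k}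
  let cleaned := row.foldl
    (fun d kv => if kv.1 ≠ "" then d.insert (pvCleanA kv.1) kv.2 else d) PySem.Dict.empty
  pvLoopA cleaned keys

-- ===== PORT B =====
-- key.strip().lower()
def pvCleanB (k : String) : String := PySem.Str.lower (PySem.Str.strip k)

-- one row entry updates the per-candidate table (vals[i]/hit[i] fused into Option String)
def pvFill (cleans : List String) (vals : List (Option String)) (kv : String × String) : List (Option String) :=
  if kv.1 ≠ "" then
    (cleans.zip vals).map (fun p => if p.1 = pvCleanB kv.1 then some kv.2 else p.2)
  else vals

-- final scan: first candidate whose recorded value strips non-empty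
def pvFirstGood : List (Option String) → Option String
  | [] => none
  | none :: rest => pvFirstGood rest
  | some v :: rest =>
    if v ≠ "" ∧ PySem.Str.strip v ≠ "" then some (PySem.Str.strip v) else pvFirstGood rest

def get_first_flexible_py_alt (row : List (String × String)) (keys : List String) : Option String :=
  let cleans := keys.map pvCleanB
  let vals := row.foldl (pvFill cleans) (cleans.map (fun _ => none))
  pvFirstGood vals

-- ===== PRECONDITION & SPEC =====
def Spec_get_first_flexible_py (row : List (String × String)) (keys : List String) (out : Option String) : Prop := out = get_first_flexible_py_alt row keys
instance (row : List (String × String)) (keys : List String) (out : Option String) : Decidable (Spec_get_first_flexible_py row keys out) := by unfold Spec_get_first_flexible_py; infer_instance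

-- ===== CLAIM (what is proved, stated in full; the proofs are below) =====
def Claim_equal_get_first_flexible_py : Prop := ∀ (row : List (String × String)) (keys : List String), Dom_get_first_flexible_py row keys → Spec_get_first_flexible_py row keys (get_first_flexible_py row keys)

-- ===== LEMMAS AND PROOFS =====

-- looking a normalized key up in A's fold-built dict is the last-match scan of the row
theorem pv_get?_fold (row : List (String × String)) (d : PySem.Dict String String) (ck : String) :
    (row.foldl (fun d kv => if kv.1 ≠ "" then d.insert (pvCleanA kv.1) kv.2 else d) d).get? ck
      = row.foldl (fun acc kv => if kv.1 ≠ "" ∧ pvCleanB kv.1 = ck then some kv.2 else acc) (d.get? ck) := by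
  induction row generalizing d with
  | nil => rfl
  | cons kv rest ih =>
    simp only [List.foldl_cons]
    rw [ih]
    by_cases hk : kv.1 = ""
    · simp [hk]
    · by_cases hc : pvCleanB kv.1 = ck
      · have : pvCleanA kv.1 = ck := hc
        simp [hk, hc, ← this, PySem.Dict.get?_insert_self]
      · have : ck ≠ pvCleanA kv.1 := fun h => hc h.symm
        simp [hk, hc, PySem.Dict.get?_insert_of_ne _ _ this]

-- one pvFill step, viewed pointwise on the table
theorem pv_fill_step (cleans : List String) (g : String → Option String) (kv : String × String) :
    pvFill cleans (cleans.map g) kv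
      = cleans.map (fun c => if kv.1 ≠ "" ∧ pvCleanB kv.1 = c then some kv.2 else g c) := by
  unfold pvFill
  by_cases hk : kv.1 = ""
  · simp [hk]
  · simp only [hk, ne_eq, not_false_iff, if_true]
    induction cleans with
    | nil => rfl
    | cons c cs ihc =>
      simp only [List.map_cons, List.zip_cons_cons, ihc]
      by_cases hc : c = pvCleanB kv.1 <;> simp [hc, eq_comm]

-- B's fold over the row, started from a table cleans.map g, ends at the pointwise last-match table
theorem pv_fill_fold (row : List (String × String)) (cleans : List String) (g : String → Option String) :
    row.foldl (pvFill cleans) (cleans.map g)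
      = cleans.map (fun c => row.foldl (fun acc kv => if kv.1 ≠ "" ∧ pvCleanB kv.1 = c then some kv.2 else acc) (g c)) := by
  induction row generalizing g with
  | nil => rfl
  | cons kv rest ih =>
    simp only [List.foldl_cons]
    rw [pv_fill_step, ih]

-- A's key loop over the dict is the final scan of the per-candidate table
theorem pv_loopA_firstGood (cleaned : PySem.Dict String String) (keys : List String) :
    pvLoopA cleaned keys = pvFirstGood (keys.map (fun k => cleaned.get? (pvCleanA k))) := by
  induction keys with
  | nil => rfl
  | cons k ks ih =>
    simp only [pvLoopA, List.map_cons]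
    cases h : cleaned.get? (pvCleanA k) with
    | none => simpa [pvFirstGood] using ih
    | some v =>
      simp only [pvFirstGood]
      split_ifs with hv
      · rfl
      · exact ih

-- ===== VERDICT (by name: the statement is the Claim_ definition above) =====
theorem get_first_flexible_py_spec : Claim_equal_get_first_flexible_py := by
  intro row keys _
  show get_first_flexible_py row keys = get_first_flexible_py_alt row keys
  show pvLoopA (row.foldl (fun d kv => if kv.1 ≠ "" then d.insert (pvCleanA kv.1) kv.2 else d) PySem.Dict.empty) keys
      = pvFirstGood (row.foldl (pvFill (keys.map pvCleanB)) ((keys.map pvCleanB).map (fun _ => none)))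
  rw [pv_loopA_firstGood, pv_fill_fold]
  congr 1
  rw [List.map_map]
  apply List.map_congr_left
  intro k _
  rw [pv_get?_fold, PySem.Dict.get?_empty]
  rfl
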